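-- pv_equiv track=rewrite | github.com/Rahonam/algorithm-syllabus | array/odd_xor_pairs.py | odd_xor
-- ===== SOURCE A (Python) =====
-- def odd_xor(arr: list):
--     """
--     Find the number of pairs with odd XOR
--
--     For bits:
--         XOR is 0 if same bits, otherwise 1
--
--     using: iteration
--
--     Args:
--         arr: array of integers
--
--     Returns:
--         int: count of odd XOR pairs
--     """
--     if len(arr) == 1:
--         return 0
--
--     count = 0
--     left_index = 0
--     while left_index < len(arr) - 1:
--         right_index = left_index + 1
--         while right_index < len(arr):
--             xor = (arr[left_index] | arr[right_index]) & (~arr[left_index] | ~arr[right_index])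
--             xor = (arr[left_index] | arr[right_index]) & (~arr[left_index] | ~arr[right_index])
--             if xor % 2 != 0:
--                 count += 1
--             right_index += 1
--         left_index += 1
--
--     return count
-- ===== SOURCE B (Python) =====
-- def odd_xor(arr: list):
--     """Count pairs with odd XOR: a XOR is odd iff the two parities differ,
--     so the answer is (#odd elements) * (#even elements)."""
--     odds = 0
--     for x in arr:
--         if x % 2:
--             odds += 1
--     return odds * (len(arr) - odds)
-- ===== Notes on version B (the rewrite author's own statement) =====
-- stated objective: faster
-- what changed: Replaced the O(n^2) double loop over all index pairs (with a bitwise XOR built from OR/AND/NOT per pair) by a single pass counting odd elements, since a XOR of two ints is odd exactly when their parities differ, giving odds*evens.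
import Mathlib
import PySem

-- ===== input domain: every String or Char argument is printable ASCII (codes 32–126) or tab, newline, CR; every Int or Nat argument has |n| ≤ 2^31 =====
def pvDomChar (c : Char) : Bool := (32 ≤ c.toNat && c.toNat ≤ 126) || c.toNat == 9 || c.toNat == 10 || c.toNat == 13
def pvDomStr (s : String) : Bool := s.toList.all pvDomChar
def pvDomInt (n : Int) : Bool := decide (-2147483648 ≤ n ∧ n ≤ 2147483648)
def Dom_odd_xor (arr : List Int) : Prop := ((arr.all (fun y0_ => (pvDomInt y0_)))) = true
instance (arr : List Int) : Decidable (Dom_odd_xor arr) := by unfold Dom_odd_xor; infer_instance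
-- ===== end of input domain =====

-- B replaces A's O(n^2) pair loop by a single parity count (odds*evens); proved equal on all inputs.


-- ===== PORT A =====
-- the expression `(x | y) & (~x | ~y)` A computes for each pair (the duplicated
-- assignment in A recomputes the identical value and is collapsed)
def pxor (x y : Int) : Int :=
  PySem.Int.band (PySem.Int.bor x y) (PySem.Int.bor (Int.not x) (Int.not y))

-- inner `while right_index < len(arr)` loop
def odd_xor_inner (arr : List Int) (li ri : Nat) (count : Int) : Int :=
  if _h : ri < arr.length then
    odd_xor_inner arr li (ri + 1)
      (if PySem.Int.mod (pxor (PySem.List.pyGetD arr (li : Int) 0) (PySem.List.pyGetD arr (ri : Int) 0)) 2 ≠ 0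
       then count + 1 else count)
  else count
termination_by arr.length - ri

-- outer `while left_index < len(arr) - 1` loop
def odd_xor_outer (arr : List Int) (li : Nat) (count : Int) : Int :=
  if _h : li < arr.length - 1 then
    odd_xor_outer arr (li + 1) (odd_xor_inner arr li (li + 1) count)
  else count
termination_by arr.length - 1 - li

def odd_xor (arr : List Int) : Int :=
  if arr.length == 1 then 0 else odd_xor_outer arr 0 0

-- ===== PORT B =====
def odd_xor_alt (arr : List Int) : Int :=
  let odds : Int := arr.foldl (fun acc x => if PySem.Int.mod x 2 ≠ 0 then acc + 1 else acc) 0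
  odds * ((arr.length : Int) - odds)

-- ===== PRECONDITION & SPEC =====
def Spec_odd_xor (arr : List Int) (out : Int) : Prop := out = odd_xor_alt arr
instance (arr : List Int) (out : Int) : Decidable (Spec_odd_xor arr out) := by unfold Spec_odd_xor; infer_instance

-- ===== CLAIM (what is proved, stated in full; the proofs are below) =====
def Claim_equal_odd_xor : Prop := ∀ (arr : List Int), Dom_odd_xor arr → Spec_odd_xor arr (odd_xor arr)

-- ===== LEMMAS AND PROOFS =====

def pOdd (x : Int) : Bool := decide (PySem.Int.mod x 2 ≠ 0)

def oddsN (xs : List Int) : Nat := xs.countP pOdd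

-- sum over i of #{j > i | parities of xs[i], xs[j] differ}, in list form
def pairSum : List Int → Int
  | [] => 0
  | x :: t => ((t.countP (fun y => pOdd y != pOdd x) : Nat) : Int) + pairSum t

lemma nat_and_odd (m n : Nat) : ((m &&& n) % 2 = 1) ↔ (m % 2 = 1 ∧ n % 2 = 1) := by
  have h := Nat.testBit_and m n 0
  simp only [Nat.testBit_zero] at h
  simpa using congrArg (· = true) h

lemma nat_or_odd (m n : Nat) : ((m ||| n) % 2 = 1) ↔ (m % 2 = 1 ∨ n % 2 = 1) := by
  have h := Nat.testBit_or m n 0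
  simp only [Nat.testBit_zero] at h
  simpa using congrArg (· = true) h

lemma int_not_eq (a : Int) : Int.not a = -a - 1 := by
  cases a <;> simp [Int.not, Int.negSucc_eq] <;> omega

lemma dvd_two_band (a b : Int) : 2 ∣ PySem.Int.band a b ↔ (2 ∣ a ∨ 2 ∣ b) := by
  unfold PySem.Int.band
  split_ifs with h1 h2 h2
  · have h := nat_and_odd a.toNat b.toNat
    omega
  · have h := nat_and_odd a.toNat (-b - 1).toNat
    have hle : a.toNat &&& (-b - 1).toNat ≤ a.toNat := Nat.and_le_left
    omega
  · have h := nat_and_odd b.toNat (-a - 1).toNat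
    have hle : b.toNat &&& (-a - 1).toNat ≤ b.toNat := Nat.and_le_left
    omega
  · have h := nat_or_odd (-a - 1).toNat (-b - 1).toNat
    omega

lemma dvd_two_bor (a b : Int) : 2 ∣ PySem.Int.bor a b ↔ (2 ∣ a ∧ 2 ∣ b) := by
  unfold PySem.Int.bor
  split_ifs with h1 h2 h2
  · have h := nat_or_odd a.toNat b.toNat
    omega
  · have h := nat_and_odd (-b - 1).toNat a.toNat
    have hle : (-b - 1).toNat &&& a.toNat ≤ (-b - 1).toNat := Nat.and_le_left
    omega
  · have h := nat_and_odd (-a - 1).toNat b.toNat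
    have hle : (-a - 1).toNat &&& b.toNat ≤ (-a - 1).toNat := Nat.and_le_left
    omega
  · have h := nat_and_odd (-a - 1).toNat (-b - 1).toNat
    omega

lemma dvd_two_pxor (x y : Int) : 2 ∣ pxor x y ↔ (2 ∣ x ↔ 2 ∣ y) := by
  simp only [pxor, int_not_eq, dvd_two_band, dvd_two_bor]
  omega

lemma pxor_odd (x y : Int) : (decide (PySem.Int.mod (pxor x y) 2 ≠ 0)) = (pOdd y != pOdd x) := by
  have hp := dvd_two_pxor x y
  by_cases hx : 2 ∣ x <;> by_cases hy : 2 ∣ y <;>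
    simp [pOdd, ne_eq, hp, hx, hy]

lemma inner_eq (arr : List Int) (li ri : Nat) (c : Int) :
    odd_xor_inner arr li ri c =
      c + (((arr.drop ri).countP (fun y => pOdd y != pOdd (PySem.List.pyGetD arr (li : Int) 0)) : Nat) : Int) := by
  fun_induction odd_xor_inner arr li ri c with
  | case1 ri c h ih =>
      simp only [dite_eq_ite] at ih
      have hg : PySem.List.pyGetD arr ((ri : Nat) : Int) 0 = arr[ri] := by
        rw [PySem.List.pyGetD_natCast, List.getD_eq_getElem _ _ h]
      rw [ih, List.drop_eq_getElem_cons h, List.countP_cons, hg]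
      have hb := pxor_odd (PySem.List.pyGetD arr (li : Int) 0) arr[ri]
      by_cases hc : PySem.Int.mod (pxor (PySem.List.pyGetD arr (li : Int) 0) arr[ri]) 2 ≠ 0
      · have hbt : (pOdd arr[ri] != pOdd (PySem.List.pyGetD arr (li : Int) 0)) = true := by
          rw [← hb]; simpa using hc
        rw [if_pos hc, hbt]
        simp
        omega
      · have hbf : (pOdd arr[ri] != pOdd (PySem.List.pyGetD arr (li : Int) 0)) = false := by
          rw [← hb]; simpa using hc
        rw [if_neg hc, hbf]
        simp
  | case2 ri c h =>
      have : arr.drop ri = [] := by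
        apply List.drop_eq_nil_of_le; omega
      simp [this]

lemma pairSum_short (l : List Int) (h : l.length ≤ 1) : pairSum l = 0 := by
  match l with
  | [] => rfl
  | [x] => simp [pairSum]
  | a :: b :: t => simp at h

lemma outer_eq (arr : List Int) (li : Nat) (c : Int) :
    odd_xor_outer arr li c = c + pairSum (arr.drop li) := by
  fun_induction odd_xor_outer arr li c with
  | case1 li c h ih =>
      have hlt : li < arr.length := by omega
      rw [ih, inner_eq, List.drop_eq_getElem_cons hlt]
      have hg : PySem.List.pyGetD arr ((li : Nat) : Int) 0 = arr[li] := by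
        rw [PySem.List.pyGetD_natCast, List.getD_eq_getElem _ _ hlt]
      rw [hg]
      show c + _ + _ = c + pairSum (arr[li] :: arr.drop (li + 1))
      simp only [pairSum]
      omega
  | case2 li c h =>
      have : (arr.drop li).length ≤ 1 := by
        simp [List.length_drop]; omega
      rw [pairSum_short _ this]; omega

lemma pairSum_closed (xs : List Int) :
    pairSum xs = (oddsN xs : Int) * ((xs.length : Int) - (oddsN xs : Int)) := by
  induction xs with
  | nil => simp [pairSum, oddsN]
  | cons x t ih =>
      have hlen := List.length_eq_countP_add_countP pOdd (l := t)
      by_cases hx : pOdd x = true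
      · have hcnt : t.countP (fun y => pOdd y != pOdd x) = t.countP (fun a => decide ¬pOdd a = true) := by
          apply List.countP_congr
          intro a _
          simp [hx]
        have hodds : oddsN (x :: t) = oddsN t + 1 := by
          simp [oddsN, hx]
        simp only [pairSum, hcnt, ih, hodds]
        have he : ((t.countP (fun a => decide ¬pOdd a = true) : Nat) : Int)
            = (t.length : Int) - (oddsN t : Int) := by
          simp only [oddsN]; omega
        rw [he]
        simp only [List.length_cons]
        push_cast
        ring
      · have hcnt : t.countP (fun y => pOdd y != pOdd x) = t.countP pOdd := by
          apply List.countP_congr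
          intro a _
          simp [Bool.eq_false_iff.mpr, hx]
        have hodds : oddsN (x :: t) = oddsN t := by
          simp [oddsN, hx]
        simp only [pairSum, hcnt, ih, oddsN]
        simp only [List.countP_cons, hx, List.length_cons]
        push_cast
        simp
        ring

lemma alt_eq (arr : List Int) : odd_xor_alt arr = pairSum arr := by
  have hfun : ∀ (acc : Int) (x : Int),
      (if PySem.Int.mod x 2 ≠ 0 then acc + 1 else acc) = if pOdd x = true then acc + 1 else acc := by
    intro acc x
    simp [pOdd]
  show (arr.foldl (fun acc x => if PySem.Int.mod x 2 ≠ 0 then acc + 1 else acc) 0) * _ = _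
  simp only [hfun]
  rw [PySem.List.foldl_count_if pOdd arr 0, pairSum_closed]
  simp [oddsN]

-- ===== VERDICT (by name: the statement is the Claim_ definition above) =====
theorem odd_xor_spec : Claim_equal_odd_xor := by
  intro arr _hdom
  show odd_xor arr = odd_xor_alt arr
  rw [alt_eq]
  unfold odd_xor
  by_cases h1 : arr.length == 1
  · have hl : arr.length = 1 := by simpa using h1
    rw [if_pos h1, pairSum_short arr (by omega)]
  · rw [if_neg h1, outer_eq]
    simp
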